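-- pv_equiv track=rewrite | github.com/jayasuriyanicol/Application-Cloud-Developer | Python 1_4/Lezione_20/Esercitazione Code & Dragons/2_0 piccoDellaLista.py | max_or_none
-- ===== SOURCE A (Python) =====
-- def max_or_none(nums: list[int]) -> int | None:
--
--     if len(nums) == 0:
--         return None
--
--     massimo = nums[0]
--
--     for n in nums[1:]:
--
--         if n > massimo:
--             massimo = n
--
--     return massimo
-- ===== SOURCE B (Python) =====
-- def max_or_none(nums: list[int]) -> int | None:
--     if not nums:
--         return None
--     return sorted(nums)[-1]
-- ===== Notes on version B (the rewrite author's own statement) =====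
-- stated objective: alternative
-- what changed: B sorts a copy of the list and returns its last element instead of scanning with a running maximum.
import Mathlib
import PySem

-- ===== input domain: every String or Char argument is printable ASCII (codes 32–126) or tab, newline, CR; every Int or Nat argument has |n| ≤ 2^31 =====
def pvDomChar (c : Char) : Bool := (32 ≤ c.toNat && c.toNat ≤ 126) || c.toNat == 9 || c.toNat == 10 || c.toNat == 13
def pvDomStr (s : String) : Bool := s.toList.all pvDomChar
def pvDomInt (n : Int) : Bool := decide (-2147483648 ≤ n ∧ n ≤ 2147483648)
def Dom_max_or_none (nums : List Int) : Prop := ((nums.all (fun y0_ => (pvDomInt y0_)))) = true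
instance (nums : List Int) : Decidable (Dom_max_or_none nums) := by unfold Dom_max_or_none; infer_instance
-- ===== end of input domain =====

-- B sorts a copy of the list and returns its last element, instead of A's single scan with a running maximum; same result, no speed claim.

-- ===== PORT A =====
-- nums[1:] on a non-empty list is its tail (PySem.List.slice_from with index 1).
def max_or_none (nums : List Int) : Option Int :=
  match nums with
  | [] => none
  | massimo :: rest =>
    some (rest.foldl (fun massimo n => if n > massimo then n else massimo) massimo)

-- ===== PORT B =====
def max_or_none_alt (nums : List Int) : Option Int :=
  if nums = [] then none
  else PySem.List.pyGet? (PySem.List.sorted nums (fun x => x) false) (-1)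

-- ===== PRECONDITION & SPEC =====
def Spec_max_or_none (nums : List Int) (out : Option Int) : Prop := out = max_or_none_alt nums
instance (nums : List Int) (out : Option Int) : Decidable (Spec_max_or_none nums out) := by unfold Spec_max_or_none; infer_instance

-- ===== CLAIM (what is proved, stated in full; the proofs are below) =====
def Claim_equal_max_or_none : Prop := ∀ (nums : List Int), Dom_max_or_none nums → Spec_max_or_none nums (max_or_none nums)

-- ===== LEMMAS AND PROOFS =====

-- A's fold step is just `max`.
lemma fold_step_eq_max : (fun (massimo n : Int) => if n > massimo then n else massimo) = max := by
  funext a b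
  simp only [max_def]
  split_ifs with h1 h2 h2 <;> omega

-- foldl max m rest is an element of m :: rest and an upper bound of it.
lemma foldl_max_mem (m : Int) (rest : List Int) : rest.foldl max m ∈ m :: rest := by
  induction rest generalizing m with
  | nil => simp
  | cons b t ih =>
    simp only [List.foldl_cons]
    rcases List.mem_cons.mp (ih (max m b)) with h | h
    · rw [h]
      rcases le_total m b with hle | hle
      · simp [max_eq_right hle]
      · simp [max_eq_left hle]
    · simp [h]

lemma foldl_max_ge (m : Int) (rest : List Int) :
    ∀ x ∈ m :: rest, x ≤ rest.foldl max m := by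
  induction rest generalizing m with
  | nil => simp
  | cons b t ih =>
    intro x hx
    simp only [List.foldl_cons]
    rcases List.mem_cons.mp hx with rfl | hx'
    · exact le_trans (le_max_left x b) (ih (max x b) _ (List.mem_cons_self))
    · rcases List.mem_cons.mp hx' with rfl | hmem
      · exact le_trans (le_max_right m x) (ih (max m x) _ (List.mem_cons_self))
      · exact ih (max m b) x (List.mem_cons.mpr (Or.inr hmem))

-- the last element of a ≤-sorted list bounds every element
lemma getLast_ge_of_pairwise (s : List Int) (h : s ≠ [])
    (hp : s.Pairwise (fun a b => a ≤ b)) : ∀ y ∈ s, y ≤ s.getLast h := by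
  induction s with
  | nil => simp at h
  | cons a t ih =>
    intro y hy
    rcases List.mem_cons.mp hy with rfl | hyt
    · match ht : t with
      | [] => simp [List.getLast]
      | b :: u =>
        have hle : y ≤ b := (List.pairwise_cons.mp hp).1 b (List.mem_cons_self)
        have := ih (by simp) (List.pairwise_cons.mp hp).2 b (List.mem_cons_self)
        rw [List.getLast_cons (by simp)]
        exact le_trans hle this
    · have ht : t ≠ [] := by intro hnil; simp [hnil] at hyt
      rw [List.getLast_cons ht]
      exact ih ht (List.pairwise_cons.mp hp).2 y hyt

-- ===== VERDICT (by name: the statement is the Claim_ definition above) =====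
theorem max_or_none_spec : Claim_equal_max_or_none := by
  intro nums _
  unfold Spec_max_or_none max_or_none max_or_none_alt
  match nums with
  | [] => rfl
  | m :: rest =>
    rw [if_neg (by simp)]
    set s := PySem.List.sorted (m :: rest) (fun x => x) false with hs
    have hsne : s ≠ [] := by
      rw [hs, Ne, PySem.List.sorted_eq_nil_iff]; simp
    rw [PySem.List.pyGet?_neg_one, List.getLast?_eq_some_getLast hsne, fold_step_eq_max]
    have hperm : s.Perm (m :: rest) := PySem.List.sorted_perm _ _ _
    have hpw : s.Pairwise (fun a b => a ≤ b) := by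
      have := PySem.List.sorted_pairwise (xs := m :: rest) (key := fun x => x) 
      simpa [hs] using this
    have hL := getLast_ge_of_pairwise s hsne hpw
    have hF := foldl_max_ge m rest
    have hmemF : rest.foldl max m ∈ s := hperm.mem_iff.mpr (foldl_max_mem m rest)
    have hmemL : s.getLast hsne ∈ m :: rest := hperm.mem_iff.mp (List.getLast_mem hsne)
    have h1 : rest.foldl max m ≤ s.getLast hsne := hL _ hmemF
    have h2 : s.getLast hsne ≤ rest.foldl max m := hF _ hmemL
    rw [le_antisymm h2 h1]
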